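-- pv_equiv track=rewrite | github.com/mtotho/spindrel | app/tools/local/dashboard_tools.py | _find_entry_by_match
-- ===== SOURCE A (Python) =====
-- from typing import Any
--
-- def _find_entry_by_match(entries: list[dict[str, Any]], needle: str) -> dict | None:
--     """Match on slug → path → name (case-insensitive)."""
--     n = needle.strip().lower()
--     for e in entries:
--         if e.get("slug", "").lower() == n:
--             return e
--     for e in entries:
--         if e.get("path", "").lower() == n:
--             return e
--     for e in entries:
--         if e.get("name", "").lower() == n:
--             return e
--     return None
-- ===== SOURCE B (Python) =====
-- def _find_entry_by_match(entries, needle):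
--     """Single pass: return immediately on a slug match; remember the first
--     path match and the first name match, resolved after the loop."""
--     n = needle.strip().lower()
--     path_match = None
--     name_match = None
--     for e in entries:
--         if e.get("slug", "").lower() == n:
--             return e
--         if path_match is None and e.get("path", "").lower() == n:
--             path_match = e
--         if name_match is None and e.get("name", "").lower() == n:
--             name_match = e
--     return path_match if path_match is not None else name_match
-- ===== Notes on version B (the rewrite author's own statement) =====
-- stated objective: alternative
-- what changed: Replaces A's three sequential scans (slug, then path, then name) by one scan that early-returns on slug and remembers the first path match and first name match in two variables resolved after the loop.
import Mathlib
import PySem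

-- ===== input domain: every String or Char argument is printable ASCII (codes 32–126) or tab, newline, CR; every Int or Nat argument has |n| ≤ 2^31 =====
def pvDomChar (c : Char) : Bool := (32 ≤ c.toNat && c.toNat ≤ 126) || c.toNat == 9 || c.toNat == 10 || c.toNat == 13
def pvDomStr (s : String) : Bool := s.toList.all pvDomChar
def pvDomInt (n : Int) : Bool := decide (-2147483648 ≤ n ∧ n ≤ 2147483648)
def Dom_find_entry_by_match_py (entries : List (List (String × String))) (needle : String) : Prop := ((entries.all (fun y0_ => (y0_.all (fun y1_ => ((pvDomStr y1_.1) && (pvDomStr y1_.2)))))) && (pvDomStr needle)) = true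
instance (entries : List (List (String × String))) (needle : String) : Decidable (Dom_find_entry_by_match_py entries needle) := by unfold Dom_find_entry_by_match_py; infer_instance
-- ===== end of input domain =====

-- B replaces A's three sequential scans by one scan with early return on slug
-- and two remembered first matches (path, name); alternative decomposition, same cost.


-- shared by both ports: Python's e.get(k, "") on an association-list dict (first match)
def pvGetS (e : List (String × String)) (k : String) : String :=
  match e.find? (fun p => p.1 == k) with
  | some p => p.2
  | none => ""

-- does entry e match needle n under key k (case-insensitively)?
def pvKeyMatch (e : List (String × String)) (k n : String) : Bool :=
  PySem.Str.lower (pvGetS e k) == n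

-- ===== PORT A =====
-- one 'for e in entries: if …: return e' loop of A
def pvALoop (k n : String) : List (List (String × String)) → Option (List (String × String))
  | [] => none
  | e :: rest => if pvKeyMatch e k n then some e else pvALoop k n rest

def find_entry_by_match_py (entries : List (List (String × String))) (needle : String) : Option (List (String × String)) :=
  let n := PySem.Str.lower (PySem.Str.strip needle)
  match pvALoop "slug" n entries with
  | some e => some e
  | none =>
    match pvALoop "path" n entries with
    | some e => some e
    | none => pvALoop "name" n entries

-- ===== PORT B =====
-- B's single loop; pm / nm are path_match / name_match
def pvBLoop (n : String) : List (List (String × String)) →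
    Option (List (String × String)) → Option (List (String × String)) → Option (List (String × String))
  | [], pm, nm => match pm with | some e => some e | none => nm
  | e :: rest, pm, nm =>
    if pvKeyMatch e "slug" n then some e
    else
      let pm' := match pm with
        | some _ => pm
        | none => if pvKeyMatch e "path" n then some e else none
      let nm' := match nm with
        | some _ => nm
        | none => if pvKeyMatch e "name" n then some e else none
      pvBLoop n rest pm' nm'

def find_entry_by_match_py_alt (entries : List (List (String × String))) (needle : String) : Option (List (String × String)) :=
  pvBLoop (PySem.Str.lower (PySem.Str.strip needle)) entries none none

-- ===== PRECONDITION & SPEC =====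
def Spec_find_entry_by_match_py (entries : List (List (String × String))) (needle : String) (out : Option (List (String × String))) : Prop := out = find_entry_by_match_py_alt entries needle
instance (entries : List (List (String × String))) (needle : String) (out : Option (List (String × String))) : Decidable (Spec_find_entry_by_match_py entries needle out) := by unfold Spec_find_entry_by_match_py; infer_instance

-- ===== CLAIM (what is proved, stated in full; the proofs are below) =====
def Claim_equal_find_entry_by_match_py : Prop := ∀ (entries : List (List (String × String))) (needle : String), Dom_find_entry_by_match_py entries needle → Spec_find_entry_by_match_py entries needle (find_entry_by_match_py entries needle)

-- ===== LEMMAS AND PROOFS =====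

-- invariant of B's loop: it computes A's slug scan, falling back to the
-- remembered matches extended by A's path / name scans of the remaining list
theorem pvBLoop_eq (n : String) (l : List (List (String × String)))
    (pm nm : Option (List (String × String))) :
    pvBLoop n l pm nm =
      match pvALoop "slug" n l with
      | some e => some e
      | none =>
        match pm.or (pvALoop "path" n l) with
        | some e => some e
        | none => nm.or (pvALoop "name" n l) := by
  induction l generalizing pm nm with
  | nil => cases pm <;> cases nm <;> simp [pvBLoop, pvALoop]
  | cons e rest ih =>
    simp only [pvBLoop, pvALoop]
    by_cases hs : pvKeyMatch e "slug" n
    · simp [hs]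
    · simp only [hs, ih]
      cases pm <;> cases nm <;>
        by_cases hp : pvKeyMatch e "path" n <;>
        by_cases hn : pvKeyMatch e "name" n <;>
        simp [hp, hn, Option.or]

-- ===== VERDICT (by name: the statement is the Claim_ definition above) =====
theorem find_entry_by_match_py_spec : Claim_equal_find_entry_by_match_py := by
  intro entries needle _
  unfold Spec_find_entry_by_match_py find_entry_by_match_py find_entry_by_match_py_alt
  rw [pvBLoop_eq]
  simp only [Option.none_or]
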